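-- pv_equiv track=rewrite | github.com/Gerryyyy4/EnsambladorZ80 | convertir.py | compl
-- ===== SOURCE A (Python) =====
-- def compl(x):
-- 	x=str(x)
-- 	z=x[::-1]
-- 	sum=0
-- 	y=0
-- 	for i in z:
-- 		y+= 1
-- 		if i=="0":
-- 			sum+= 2**(y-1)
-- 	sum= -(sum+1)
-- 	return sum
-- ===== SOURCE B (Python) =====
-- def compl(x):
--     s = str(x)
--     bits = ''.join('1' if c == '0' else '0' for c in s)
--     return -1 - (int(bits, 2) if bits else 0)
-- ===== Notes on version B (the rewrite author's own statement) =====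
-- stated objective: simpler
-- what changed: B replaces A's reversed-string loop with an explicit power-of-two accumulator by building a binary mask string ('1' where the char is '0') and parsing it as a base-2 integer, then returning -1 - value.
import Mathlib
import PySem

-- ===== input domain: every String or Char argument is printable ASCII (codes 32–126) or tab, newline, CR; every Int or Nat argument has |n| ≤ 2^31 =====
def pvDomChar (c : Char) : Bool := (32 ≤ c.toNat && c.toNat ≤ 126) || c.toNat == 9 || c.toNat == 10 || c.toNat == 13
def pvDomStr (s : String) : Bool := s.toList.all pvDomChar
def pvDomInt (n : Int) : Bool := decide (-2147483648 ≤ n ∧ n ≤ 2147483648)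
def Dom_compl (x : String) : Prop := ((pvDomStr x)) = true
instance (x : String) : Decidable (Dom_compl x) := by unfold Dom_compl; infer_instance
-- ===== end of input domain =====

-- B replaces A's reversed-iteration power-of-two accumulator by a binary-mask string parsed in base 2 (simpler).

-- ===== PORT A =====
-- z = x[::-1]; loop with counter y, adding 2**(y-1) for each '0' character.
def compl (x : String) : Int :=
  let z := x.toList.reverse
  let p := z.foldl (fun (p : Int × Nat) (i : Char) =>
      let y := p.2 + 1
      ((if i = '0' then p.1 + (2 : Int) ^ (y - 1) else p.1), y)) (0, 0)
  Neg.neg (p.1 + 1)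

-- ===== PORT B =====
-- bits = ''.join('1' if c=='0' else '0' for c in s); int(bits, 2) ported as the
-- standard left fold acc*2 + bit (exact for a '0'/'1' string); empty bits gives 0.
def compl_alt (x : String) : Int :=
  let bits := x.toList.map (fun c => if c = '0' then '1' else '0')
  let v := bits.foldl (fun (acc : Int) c => acc * 2 + (if c = '1' then 1 else 0)) 0
  Int.sub (-1) (if bits.isEmpty then 0 else v)

-- ===== PRECONDITION & SPEC =====
def Spec_compl (x : String) (out : Int) : Prop := out = compl_alt x
instance (x : String) (out : Int) : Decidable (Spec_compl x out) := by unfold Spec_compl; infer_instance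

-- ===== CLAIM (what is proved, stated in full; the proofs are below) =====
def Claim_equal_compl : Prop := ∀ (x : String), Dom_compl x → Spec_compl x (compl x)

-- ===== LEMMAS AND PROOFS =====

-- Σ over l of 2^(y+position) for '0' characters
def powSum : Nat → List Char → Int
  | _, [] => 0
  | y, c :: t => (if c = '0' then (2 : Int) ^ y else 0) + powSum (y + 1) t

theorem compl_loop (l : List Char) : ∀ (s : Int) (y : Nat),
    l.foldl (fun (p : Int × Nat) (i : Char) =>
      let y := p.2 + 1
      ((if i = '0' then p.1 + (2 : Int) ^ (y - 1) else p.1), y)) (s, y)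
    = (s + powSum y l, y + l.length) := by
  induction l with
  | nil => intro s y; simp [powSum]
  | cons c t ih =>
    intro s y
    simp only [List.foldl_cons, powSum, ih]
    by_cases h : c = '0' <;> simp only [h, if_true, if_false] <;>
      refine Prod.ext ?_ (by simp only [List.length_cons]; omega)
    · show s + 2 ^ (y + 1 - 1) + powSum (y + 1) t = s + (2 ^ y + powSum (y + 1) t)
      have : y + 1 - 1 = y := by omega
      rw [this]; ring
    · show s + powSum (y + 1) t = s + (0 + powSum (y + 1) t)
      ring

def bval : List Char → Int :=
  List.foldl (fun (acc : Int) c => acc * 2 + (if c = '0' then 1 else 0)) 0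

theorem bfold_gen (l : List Char) : ∀ (a : Int),
    l.foldl (fun (acc : Int) c => acc * 2 + (if c = '0' then 1 else 0)) a
    = a * 2 ^ l.length + bval l := by
  induction l with
  | nil => intro a; simp [bval]
  | cons c t ih =>
    intro a
    simp only [List.foldl_cons]
    rw [ih, show bval (c :: t) = (0 * 2 + (if c = '0' then 1 else 0)) * 2 ^ t.length + bval t
        from by unfold bval; simp only [List.foldl_cons]; rw [ih]; rfl]
    simp only [List.length_cons, pow_succ]
    ring

theorem powSum_snoc (l : List Char) : ∀ (y : Nat) (c : Char),
    powSum y (l ++ [c]) = powSum y l + (if c = '0' then (2 : Int) ^ (y + l.length) else 0) := by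
  induction l with
  | nil => intro y c; simp [powSum]
  | cons d t ih =>
    intro y c
    simp only [List.cons_append, powSum, ih]
    have : y + 1 + t.length = y + (d :: t).length := by simp; omega
    rw [this]
    ring

theorem bval_eq_powSum (l : List Char) : bval l = powSum 0 l.reverse := by
  induction l with
  | nil => simp [bval, powSum]
  | cons c t ih =>
    simp only [bval, List.foldl_cons, List.reverse_cons]
    rw [bfold_gen, powSum_snoc, ← ih]
    simp [bval]
    by_cases h : c = '0' <;> simp [h] <;> try ring

-- ===== VERDICT (by name: the statement is the Claim_ definition above) =====
theorem compl_spec : Claim_equal_compl := by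
  intro x _
  unfold Spec_compl _root_.compl compl_alt
  simp only
  rw [compl_loop]
  have hmap : (x.toList.map (fun c => if c = '0' then '1' else '0')).foldl
      (fun (acc : Int) c => acc * 2 + (if c = '1' then 1 else 0)) 0
      = bval x.toList := by
    rw [List.foldl_map]
    unfold bval
    congr 1
    funext acc c
    by_cases h : c = '0' <;> simp [h]
  rw [hmap, bval_eq_powSum]
  cases hx : x.toList with
  | nil =>
    simp [powSum]
    rw [show ∀ a b : Int, a.sub b = a - b from fun _ _ => rfl]; ring
  | cons c t =>
    simp only [List.map_cons, List.isEmpty_cons, if_neg Bool.false_ne_true]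
    rw [show ∀ a b : Int, a.sub b = a - b from fun _ _ => rfl]; ring
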